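-- pv_equiv track=rewrite | github.com/mrosaortega/katas | V.2Katas.entregable.py | generar_tuplas_caracteres
-- ===== SOURCE A (Python) =====
-- def generar_tuplas_caracteres(caracteres):
--
--     lista_resultado = []
--     lista_usadas =[]
--
--     for car in caracteres:
--         car = car.lower()
--         if car not in lista_usadas:
--             lista_resultado.append((car.upper(), car))
--             lista_usadas.append(car)
--     return lista_resultado
-- ===== SOURCE B (Python) =====
-- def generar_tuplas_caracteres(caracteres):
--     if not caracteres:
--         return []
--     c = caracteres[0].lower()
--     resto = ''.join(x for x in caracteres[1:] if x.lower() != c)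
--     return [(c.upper(), c)] + generar_tuplas_caracteres(resto)
-- ===== Notes on version B (the rewrite author's own statement) =====
-- stated objective: alternative
-- what changed: Replaces A's single accumulator pass with seen-list membership by a head-recursive algorithm with no seen structure at all: take the first character, delete every later character with the same lowercased value, and recurse on the shortened remainder.
import Mathlib
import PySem

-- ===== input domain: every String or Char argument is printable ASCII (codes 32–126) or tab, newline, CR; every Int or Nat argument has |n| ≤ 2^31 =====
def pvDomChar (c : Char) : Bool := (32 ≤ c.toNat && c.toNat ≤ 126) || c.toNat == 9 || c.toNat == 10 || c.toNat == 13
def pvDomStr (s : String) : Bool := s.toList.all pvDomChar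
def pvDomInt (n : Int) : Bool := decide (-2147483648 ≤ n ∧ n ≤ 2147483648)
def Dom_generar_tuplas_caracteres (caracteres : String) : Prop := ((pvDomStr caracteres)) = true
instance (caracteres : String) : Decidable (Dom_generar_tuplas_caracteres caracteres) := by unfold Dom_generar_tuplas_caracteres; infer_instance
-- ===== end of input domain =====

-- B replaces A's single seen-list pass by a head-recursive algorithm with no seen
-- structure: keep the head, delete its later lowercase-duplicates, recurse (alternative).


-- ===== PORT A =====
-- for car in caracteres: car = car.lower(); if car not in lista_usadas: append to both lists
def generar_tuplas_caracteres (caracteres : String) : List (String × String) :=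
  (caracteres.toList.foldl
    (fun (st : List (String × String) × List String) c =>
      let car := PySem.Str.lower (String.ofList [c])
      if st.2.contains car then st
      else (st.1 ++ [(PySem.Str.upper car, car)], st.2 ++ [car]))
    ([], [])).1

-- ===== PORT B =====
-- if not caracteres: []; c = caracteres[0].lower();
-- resto = the tail with every x whose x.lower() == c deleted; [(c.upper(), c)] + recurse(resto)
def pvAltGo : List Char → List (String × String)
  | [] => []
  | x :: rest =>
    let c := PySem.Str.lower (String.ofList [x])
    (PySem.Str.upper c, c) ::
      pvAltGo (rest.filter (fun y => PySem.Str.lower (String.ofList [y]) ≠ c))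
  termination_by l => l.length
  decreasing_by
    simp only [List.length_unattach, List.length_cons, Nat.lt_succ_iff]
    exact le_trans (List.length_filter_le _ _) (by simp)

def generar_tuplas_caracteres_alt (caracteres : String) : List (String × String) :=
  pvAltGo caracteres.toList

-- ===== PRECONDITION & SPEC =====
def Spec_generar_tuplas_caracteres (caracteres : String) (out : List (String × String)) : Prop := out = generar_tuplas_caracteres_alt caracteres
instance (caracteres : String) (out : List (String × String)) : Decidable (Spec_generar_tuplas_caracteres caracteres out) := by unfold Spec_generar_tuplas_caracteres; infer_instance

-- ===== CLAIM (what is proved, stated in full; the proofs are below) =====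
def Claim_equal_generar_tuplas_caracteres : Prop := ∀ (caracteres : String), Dom_generar_tuplas_caracteres caracteres → Spec_generar_tuplas_caracteres caracteres (generar_tuplas_caracteres caracteres)

-- ===== LEMMAS AND PROOFS =====

-- The "keep head, drop its duplicates, recurse" recursion on the lowercased strings.
def pvUniq : List String → List String
  | [] => []
  | c :: rest => c :: pvUniq (rest.filter (· ≠ c))
  termination_by l => l.length
  decreasing_by
    simp only [List.length_unattach, List.length_cons, Nat.lt_succ_iff]
    exact le_trans (List.length_filter_le _ _) (by simp)

-- Loop invariant for A: lista_resultado is the pair-builder mapped over lista_usadas,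
-- and lista_usadas evolves as PySem.Set.add folded over the lowercased characters.
theorem pv_loop_inv (l : List Char) (used : List String) :
    l.foldl
      (fun (st : List (String × String) × List String) c =>
        let car := PySem.Str.lower (String.ofList [c])
        if st.2.contains car then st
        else (st.1 ++ [(PySem.Str.upper car, car)], st.2 ++ [car]))
      (used.map (fun car => (PySem.Str.upper car, car)), used)
    = (((l.map (fun c => PySem.Str.lower (String.ofList [c]))).foldl PySem.Set.add used).map
         (fun car => (PySem.Str.upper car, car)),
       (l.map (fun c => PySem.Str.lower (String.ofList [c]))).foldl PySem.Set.add used) := by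
  induction l generalizing used with
  | nil => rfl
  | cons c l ih =>
    by_cases h : PySem.Str.lower (String.ofList [c]) ∈ used
    · simpa [PySem.Set.add, h] using ih used
    · simpa [PySem.Set.add, h, List.map_append] using
        ih (used ++ [PySem.Str.lower (String.ofList [c])])

-- A's seen-set fold equals "used ++ pvUniq of the not-yet-seen elements".
theorem pv_foldl_add_eq_uniq (cs : List String) (used : List String) :
    cs.foldl PySem.Set.add used = used ++ pvUniq (cs.filter (fun x => x ∉ used)) := by
  induction cs generalizing used with
  | nil => simp [pvUniq]
  | cons c cs ih =>
    have hadd : PySem.Set.add used c = if c ∈ used then used else used ++ [c] := by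
      simp [PySem.Set.add, List.contains_eq_mem]
    by_cases h : c ∈ used
    · rw [List.foldl_cons, hadd, if_pos h, ih used]
      simp [h]
    · rw [List.foldl_cons, hadd, if_neg h, ih (used ++ [c])]
      simp [h, pvUniq, List.filter_filter]
      congr 1
      exact List.filter_congr (fun x _ => Bool.and_comm _ _)

-- B's recursion equals the pair-builder mapped over pvUniq of the lowercased characters.
theorem pv_altGo_eq (n : Nat) (cs : List Char) (hn : cs.length ≤ n) :
    pvAltGo cs
      = (pvUniq (cs.map (fun c => PySem.Str.lower (String.ofList [c])))).map
          (fun car => (PySem.Str.upper car, car)) := by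
  induction n generalizing cs with
  | zero =>
    have : cs = [] := List.length_eq_zero_iff.mp (Nat.le_zero.mp hn)
    subst this; simp [pvAltGo, pvUniq]
  | succ n ih =>
    cases cs with
    | nil => simp [pvAltGo, pvUniq]
    | cons x rest =>
      rw [pvAltGo]
      have hmap : (rest.filter (fun y =>
            PySem.Str.lower (String.ofList [y]) ≠ PySem.Str.lower (String.ofList [x]))).map
            (fun c => PySem.Str.lower (String.ofList [c]))
          = (rest.map (fun c => PySem.Str.lower (String.ofList [c]))).filter
              (· ≠ PySem.Str.lower (String.ofList [x])) := by
        rw [List.filter_map]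
        rfl
      rw [ih _ (le_trans (List.length_filter_le _ _) (Nat.le_of_succ_le_succ hn)), hmap]
      simp [pvUniq]

-- ===== VERDICT (by name: the statement is the Claim_ definition above) =====
theorem generar_tuplas_caracteres_spec : Claim_equal_generar_tuplas_caracteres := by
  intro caracteres _
  unfold Spec_generar_tuplas_caracteres generar_tuplas_caracteres generar_tuplas_caracteres_alt
  have h := pv_loop_inv caracteres.toList []
  simp only [List.map_nil] at h
  rw [h, pv_foldl_add_eq_uniq, pv_altGo_eq caracteres.toList.length caracteres.toList le_rfl]
  simp
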